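-- pv_equiv track=rewrite | github.com/yuus95/algorithm_study | Yushin/2020년 카카오/괄호변환/0903 복습.py | check_p
-- ===== SOURCE A (Python) =====
-- from collections import deque
--
-- x = ["(()())()",")(","()))((()"]
--
-- def check_p(p):
--     test = deque(p)
--     u,v ="",""
--     stack =[]
--     while test :
--         x = test.popleft()
--         if x == ')':
--             stack.append(x)
--             u+=x
--         else :
--             u+= x
--             if stack:
--                 stack.pop()
--             else:
--                 test.appendleft(x)
--                 v = test
--                 break
--
--
--     return "".join(u),"".join(v)
-- ===== SOURCE B (Python) =====
-- def check_p(p):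
--     stop = None
--     b = 0
--     for i, c in enumerate(p):
--         if c == ')':
--             b += 1
--         elif b > 0:
--             b -= 1
--         else:
--             stop = i
--             break
--     if stop is None:
--         return (p, "")
--     return (p[:stop + 1], p[stop:])
-- ===== Notes on version B (the rewrite author's own statement) =====
-- stated objective: faster
-- what changed: Replaces the deque+explicit-stack loop that builds u character-by-character with a single integer balance counter that finds the break index, then returns two slices of p.
import Mathlib
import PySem

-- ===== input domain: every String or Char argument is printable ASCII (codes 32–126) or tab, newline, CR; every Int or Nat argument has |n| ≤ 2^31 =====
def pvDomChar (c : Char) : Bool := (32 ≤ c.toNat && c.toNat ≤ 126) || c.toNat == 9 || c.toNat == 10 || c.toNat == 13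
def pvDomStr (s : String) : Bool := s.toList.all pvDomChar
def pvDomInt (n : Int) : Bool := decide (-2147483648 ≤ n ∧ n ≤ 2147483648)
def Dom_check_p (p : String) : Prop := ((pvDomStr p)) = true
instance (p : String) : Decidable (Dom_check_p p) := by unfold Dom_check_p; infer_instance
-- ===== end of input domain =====

-- B replaces A's deque+stack character-by-character accumulation with a single
-- balance-counter scan that finds the break index and then slices (objective: simpler).

-- ===== PORT A =====
-- the while-loop over the deque: state = (remaining deque, u, stack)
def check_pGo : List Char → List Char → List Char → String × String
  | [], u, _ => (String.ofList u, "")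
  | x :: rest, u, stack =>
    if x = ')' then
      -- stack.append(x); u += x
      check_pGo rest (u ++ [x]) (stack ++ [x])
    else
      -- u += x; pop or break with x put back
      match stack with
      | _ :: _ => check_pGo rest (u ++ [x]) (stack.dropLast)
      | [] => (String.ofList (u ++ [x]), String.ofList (x :: rest))

def check_p (p : String) : String × String :=
  check_pGo p.toList [] []

-- ===== PORT B =====
-- the for-loop with enumerate: returns the stop index, maintaining balance b
def check_pFindStop : List Char → Nat → Nat → Option Nat
  | [], _, _ => none
  | c :: rest, i, b =>
    if c = ')' then check_pFindStop rest (i + 1) (b + 1)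
    else if b > 0 then check_pFindStop rest (i + 1) (b - 1)
    else some i

def check_p_alt (p : String) : String × String :=
  match check_pFindStop p.toList 0 0 with
  | none => (p, "")
  -- p[:stop+1], p[stop:] with 0 ≤ stop < len p: exact as take/drop
  | some i => (String.ofList (p.toList.take (i + 1)), String.ofList (p.toList.drop i))

-- ===== PRECONDITION & SPEC =====
def Spec_check_p (p : String) (out : String × String) : Prop := out = check_p_alt p
instance (p : String) (out : String × String) : Decidable (Spec_check_p p out) := by unfold Spec_check_p; infer_instance

-- ===== CLAIM (what is proved, stated in full; the proofs are below) =====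
def Claim_equal_check_p : Prop := ∀ (p : String), Dom_check_p p → Spec_check_p p (check_p p)

-- ===== LEMMAS AND PROOFS =====

-- the index parameter of the counter loop only shifts the result
theorem findStop_shift (l : List Char) (i b : Nat) :
    check_pFindStop l i b = (check_pFindStop l 0 b).map (· + i) := by
  induction l generalizing i b with
  | nil => simp [check_pFindStop]
  | cons c rest ih =>
    simp only [check_pFindStop]
    split_ifs with h1 h2
    · rw [ih (i + 1), ih 1]
      cases check_pFindStop rest 0 (b + 1) <;> simp <;> omega
    · rw [ih (i + 1), ih 1]
      cases check_pFindStop rest 0 (b - 1) <;> simp <;> omega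
    · simp

-- the A-loop computed through B's stop index, for any accumulator and stack
theorem go_eq (l : List Char) (u stack : List Char) :
    check_pGo l u stack =
      match check_pFindStop l 0 stack.length with
      | none => (String.ofList (u ++ l), "")
      | some i => (String.ofList (u ++ l.take (i + 1)), String.ofList (l.drop i)) := by
  induction l generalizing u stack with
  | nil => simp [check_pGo, check_pFindStop]
  | cons c rest ih =>
    simp only [check_pGo, check_pFindStop]
    by_cases hc : c = ')'
    · simp only [if_pos hc]
      rw [ih (u ++ [c]) (stack ++ [c]), findStop_shift rest 1 (stack.length + 1)]
      simp only [List.length_append, List.length_cons, List.length_nil]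
      cases check_pFindStop rest 0 (stack.length + 1) with
      | none => simp
      | some j => simp [List.take_succ_cons, List.drop_succ_cons]
    · simp only [if_neg hc]
      cases stack with
      | nil => simp
      | cons s ss =>
        rw [ih (u ++ [c]) ((s :: ss).dropLast), findStop_shift rest 1]
        have hlen : ((s :: ss).dropLast).length = ss.length := by
          simp [List.length_dropLast]
        rw [hlen]
        simp only [List.length_cons, Nat.add_sub_cancel, gt_iff_lt,
          Nat.succ_pos, if_pos]
        cases check_pFindStop rest 0 ss.length with
        | none => simp
        | some j => simp [List.take_succ_cons, List.drop_succ_cons]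

-- ===== VERDICT (by name: the statement is the Claim_ definition above) =====
theorem check_p_spec : Claim_equal_check_p := by
  intro p _
  unfold Spec_check_p check_p check_p_alt
  rw [go_eq p.toList [] []]
  simp only [List.length_nil]
  cases check_pFindStop p.toList 0 0 with
  | none => simp [String.ofList_toList]
  | some i => simp
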